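-- pv_equiv track=rewrite | github.com/Vodafone/chaostoolkit-wiremock | chaoswm/driver.py | strict_filter
-- ===== SOURCE A (Python) =====
-- from typing import Any, Dict, List, Mapping, Optional
--
-- def strict_filter(node: Mapping, _filter: Mapping) -> bool:
--     intersec = node.keys() & _filter.keys()
--     if len(intersec) != len(_filter.keys()):
--         return False
--     for key in _filter.keys():
--         f = _filter[key]
--         comp = node.get(key)
--         if f != comp:
--             return False
--     return True
-- ===== SOURCE B (Python) =====
-- def strict_filter(node, _filter) -> bool:
--     # merge-and-compare: overlaying the filter on a copy of node changes nothing
--     # exactly when every filter key is already in node with an equal value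
--     merged = dict(node)
--     merged.update(_filter)
--     return merged == dict(node)
-- ===== Notes on version B (the rewrite author's own statement) =====
-- stated objective: alternative
-- what changed: B replaces A's key-intersection test plus per-key comparison loop by merge-and-compare: it builds a copy of node, overlays _filter onto it with dict.update, and returns whether the merged dict still equals dict(node).
import Mathlib
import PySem

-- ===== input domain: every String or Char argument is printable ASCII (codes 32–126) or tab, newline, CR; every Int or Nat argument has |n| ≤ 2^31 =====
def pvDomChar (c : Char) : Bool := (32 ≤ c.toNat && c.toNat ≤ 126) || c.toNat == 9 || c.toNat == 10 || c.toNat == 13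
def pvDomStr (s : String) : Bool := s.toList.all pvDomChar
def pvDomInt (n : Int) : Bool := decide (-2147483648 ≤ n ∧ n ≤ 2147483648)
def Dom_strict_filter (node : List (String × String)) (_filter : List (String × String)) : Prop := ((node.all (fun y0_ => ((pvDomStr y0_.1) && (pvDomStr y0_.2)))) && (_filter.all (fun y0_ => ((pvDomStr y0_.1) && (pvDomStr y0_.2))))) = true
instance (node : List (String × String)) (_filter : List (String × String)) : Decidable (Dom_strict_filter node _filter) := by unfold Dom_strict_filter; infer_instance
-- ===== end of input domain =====

-- B replaces A's intersection-then-compare key loop by merge-and-compare: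
-- dict(node) updated with _filter equals dict(node) iff the filter changes nothing.

-- the assoc-list reading of d[k] / d.get(k) for a dict (first match)
def pvGet (d : List (String × String)) (k : String) : Option String :=
  (d.find? (fun p => p.1 == k)).map (·.2)

-- ===== PORT A =====
-- for key in _filter.keys(): f = _filter[key]; comp = node.get(key); if f != comp: return False
def strictFilterLoopA (node _filter : List (String × String)) : List String → Bool
  | [] => true
  | key :: rest =>
    let f := pvGet _filter key
    let comp := pvGet node key
    if f ≠ comp then false else strictFilterLoopA node _filter rest

def strict_filter (node : List (String × String)) (_filter : List (String × String)) : Bool :=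
  let nkeys := node.map (·.1)                                     -- node.keys()
  let fkeys := _filter.map (·.1)                                  -- _filter.keys()
  let intersec := nkeys.filter (fun k => fkeys.contains k)        -- node.keys() & _filter.keys()
  if intersec.length ≠ fkeys.length then false
  else strictFilterLoopA node _filter fkeys

-- ===== PORT B =====
-- Python's dict == ignores insertion order: same key set and same value at each key
def pyDictEq (d1 d2 : PySem.Dict String String) : Bool :=
  d1.size == d2.size && d1.keys.all (fun k => d1.get? k == d2.get? k)

def strict_filter_alt (node : List (String × String)) (_filter : List (String × String)) : Bool :=
  let merged := (PySem.Dict.ofList node).update _filter   -- merged = dict(node); merged.update(_filter)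
  pyDictEq merged (PySem.Dict.ofList node)                -- merged == dict(node)

-- ===== PRECONDITION & SPEC =====
-- Both parameters are Python dicts, whose keys are unique; Pre_ states that representation
-- invariant of the association lists. It excludes no input a Python caller can build.
def Pre_strict_filter (node : List (String × String)) (_filter : List (String × String)) : Prop :=
  (node.map (·.1)).Nodup ∧ (_filter.map (·.1)).Nodup
instance (node : List (String × String)) (_filter : List (String × String)) : Decidable (Pre_strict_filter node _filter) := by unfold Pre_strict_filter; infer_instance

def pvWitness_strict_filter : (List (String × String)) × (List (String × String)) :=
  ([("a", "x"), ("b", "y")], [("a", "x")])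

def Spec_strict_filter (node : List (String × String)) (_filter : List (String × String)) (out : Bool) : Prop := out = strict_filter_alt node _filter
instance (node : List (String × String)) (_filter : List (String × String)) (out : Bool) : Decidable (Spec_strict_filter node _filter out) := by unfold Spec_strict_filter; infer_instance

-- ===== CLAIM (what is proved, stated in full; the proofs are below) =====
def Claim_equal_strict_filter : Prop := ∀ (node : List (String × String)) (_filter : List (String × String)), Dom_strict_filter node _filter → Pre_strict_filter node _filter → Spec_strict_filter node _filter (strict_filter node _filter)

-- ===== LEMMAS AND PROOFS =====

theorem pvGet_isSome (l : List (String × String)) (k : String) :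
    (pvGet l k).isSome ↔ k ∈ l.map (·.1) := by
  simp [pvGet, List.find?_isSome, List.mem_map]

-- A's inner loop is true iff every visited key compares equal
theorem loopA_true_iff (node _filter : List (String × String)) (ks : List String) :
    strictFilterLoopA node _filter ks = true ↔
      ∀ k ∈ ks, pvGet _filter k = pvGet node k := by
  induction ks with
  | nil => simp [strictFilterLoopA]
  | cons k rest ih =>
    by_cases h : pvGet _filter k = pvGet node k
    · simp [strictFilterLoopA, h, ih]
    · simp [strictFilterLoopA, h]

-- the intersection length test succeeds exactly when every filter key is a node key
theorem intersec_len_iff (node _filter : List (String × String))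
    (hn : (node.map (·.1)).Nodup) (hf : (_filter.map (·.1)).Nodup) :
    ((node.map (·.1)).filter (fun k => (_filter.map (·.1)).contains k)).length
        = (_filter.map (·.1)).length
      ↔ ∀ k ∈ _filter.map (·.1), k ∈ node.map (·.1) := by
  have hnn : ((node.map (·.1)).filter (fun k => (_filter.map (·.1)).contains k)).Nodup :=
    hn.filter _
  constructor
  · intro hlen k hk
    have hsub : ∀ x ∈ (node.map (·.1)).filter (fun k => (_filter.map (·.1)).contains k),
        x ∈ _filter.map (·.1) := by
      intro x hx
      have := (List.mem_filter.mp hx).2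
      simpa using this
    have hperm : ((node.map (·.1)).filter (fun k => (_filter.map (·.1)).contains k)).Perm
        (_filter.map (·.1)) := by
      apply List.Subperm.perm_of_length_le
      · exact List.subperm_of_subset hnn hsub
      · omega
    have := hperm.mem_iff.mpr hk
    exact (List.mem_filter.mp this).1
  · intro hall
    have hperm : ((node.map (·.1)).filter (fun k => (_filter.map (·.1)).contains k)).Perm
        (_filter.map (·.1)) := by
      rw [List.perm_ext_iff_of_nodup hnn hf]
      intro a
      simp only [List.mem_filter]
      constructor
      · rintro ⟨_, h⟩; simpa using h
      · intro ha; exact ⟨hall a ha, by simpa using ha⟩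
    exact hperm.length_eq

-- A is true iff every filter key compares equal (the length test is subsumed by the loop)
theorem A_true_iff (node _filter : List (String × String))
    (hn : (node.map (·.1)).Nodup) (hf : (_filter.map (·.1)).Nodup) :
    strict_filter node _filter = true ↔
      ∀ k ∈ _filter.map (·.1), pvGet _filter k = pvGet node k := by
  unfold strict_filter
  by_cases hlen : ((node.map (·.1)).filter (fun k => (_filter.map (·.1)).contains k)).length
      = (_filter.map (·.1)).length
  · simp only [hlen, ne_eq, not_true_eq_false, if_false]
    exact loopA_true_iff node _filter _
  · simp only [if_pos hlen]
    constructor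
    · intro h; exact absurd h (by simp)
    · intro hC
      exfalso
      apply hlen
      rw [intersec_len_iff node _filter hn hf]
      intro k hk
      have hs : (pvGet _filter k).isSome := (pvGet_isSome _ k).mpr hk
      rw [hC k hk] at hs
      exact (pvGet_isSome _ k).mp hs

-- d updated with a duplicate-free pair list: first-match lookup in the list, else d
theorem get?_update_or (d : PySem.Dict String String) (l : List (String × String))
    (hl : (l.map (·.1)).Nodup) (k : String) :
    (d.update l).get? k = (pvGet l k).or (d.get? k) := by
  induction l generalizing d with
  | nil => simp [PySem.Dict.update, pvGet]
  | cons p rest ih =>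
    obtain ⟨hnotin, hrest⟩ := by simpa [List.nodup_cons] using hl
    have hstep : (d.update (p :: rest)).get? k = ((d.insert p.1 p.2).update rest).get? k := rfl
    rw [hstep, ih _ hrest]
    by_cases hpk : p.1 = k
    · subst hpk
      have hnone : pvGet rest p.1 = none := by
        simp only [pvGet, Option.map_eq_none_iff, List.find?_eq_none]
        intro q hq
        simp only [beq_iff_eq]
        intro h
        have hq' : (p.1, q.2) ∈ rest := by rw [← h]; simpa using hq
        exact hnotin q.2 hq'
      rw [hnone]
      simp [pvGet, PySem.Dict.get?_insert_self]
    · have : pvGet (p :: rest) k = pvGet rest k := by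
        simp [pvGet, hpk]
      rw [this, PySem.Dict.get?_insert_of_ne _ _ (fun h => hpk h.symm)]

-- dict(node) looks up as the assoc list does (keys unique)
theorem get?_ofList_eq_pvGet (node : List (String × String))
    (hn : (node.map (·.1)).Nodup) (k : String) :
    (PySem.Dict.ofList node).get? k = pvGet node k := by
  have : (PySem.Dict.ofList node).get? k = (pvGet node k).or (PySem.Dict.empty.get? k) := by
    exact get?_update_or _ node hn k
  simpa [PySem.Dict.get?_empty] using this

-- B is true iff every filter key compares equal (the size test is subsumed by the value test)
theorem B_true_iff (node _filter : List (String × String))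
    (hn : (node.map (·.1)).Nodup) (hf : (_filter.map (·.1)).Nodup) :
    strict_filter_alt node _filter = true ↔
      ∀ k ∈ _filter.map (·.1), pvGet _filter k = pvGet node k := by
  have hN : ∀ k, (PySem.Dict.ofList node).get? k = pvGet node k :=
    get?_ofList_eq_pvGet node hn
  have hM : ∀ k, ((PySem.Dict.ofList node).update _filter).get? k
      = (pvGet _filter k).or (pvGet node k) := by
    intro k; rw [get?_update_or _ _ hf k, hN k]
  have hNnd : (PySem.Dict.ofList node).keys.Nodup := PySem.Dict.nodup_keys_ofList node
  have hMnd : ((PySem.Dict.ofList node).update _filter).keys.Nodup :=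
    PySem.Dict.nodup_keys_update _ _ hNnd
  have hmemM : ∀ k, k ∈ ((PySem.Dict.ofList node).update _filter).keys ↔
      ((pvGet _filter k).or (pvGet node k)).isSome := by
    intro k
    rw [← PySem.Dict.contains_iff_mem_keys, PySem.Dict.contains_eq_isSome_get?, hM k]
  have hmemN : ∀ k, k ∈ (PySem.Dict.ofList node).keys ↔ (pvGet node k).isSome := by
    intro k
    rw [← PySem.Dict.contains_iff_mem_keys, PySem.Dict.contains_eq_isSome_get?, hN k]
  unfold strict_filter_alt pyDictEq
  simp only [Bool.and_eq_true, beq_iff_eq, List.all_eq_true]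
  constructor
  · rintro ⟨-, hall⟩ k hk
    have hsome : (pvGet _filter k).isSome := (pvGet_isSome _ k).mpr hk
    obtain ⟨v, hv⟩ := Option.isSome_iff_exists.mp hsome
    have hkM : k ∈ ((PySem.Dict.ofList node).update _filter).keys := by
      rw [hmemM k, hv]; rfl
    have := hall k hkM
    rw [hM k, hN k, hv, Option.some_or] at this
    rw [hv, ← this]
  · intro hC
    constructor
    · -- sizes: the key lists are membership-equal nodup lists, hence a permutation
      have hperm : ((PySem.Dict.ofList node).update _filter).keys.Perm
          (PySem.Dict.ofList node).keys := by
        rw [List.perm_ext_iff_of_nodup hMnd hNnd]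
        intro k
        rw [hmemM k, hmemN k]
        constructor
        · intro hs
          cases hfk : pvGet _filter k with
          | none => simpa [hfk] using hs
          | some v =>
            have hk : k ∈ _filter.map (·.1) := (pvGet_isSome _ k).mp (by simp [hfk])
            rw [← hC k hk, hfk]; simp
        · intro hs
          cases hfk : pvGet _filter k
          · simpa using hs
          · rfl
      have : ((PySem.Dict.ofList node).update _filter).keys.length
          = (PySem.Dict.ofList node).keys.length := hperm.length_eq
      simpa [PySem.Dict.size, PySem.Dict.keys] using this
    · intro k _
      rw [hM k, hN k]
      cases hfk : pvGet _filter k with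
      | none => simp
      | some v =>
        have hk : k ∈ _filter.map (·.1) := (pvGet_isSome _ k).mp (by simp [hfk])
        have := hC k hk
        rw [hfk] at this
        simp [← this]

-- ===== VERDICT (by name: the statement is the Claim_ definition above) =====
theorem strict_filter_spec : Claim_equal_strict_filter := by
  intro node _filter _ hpre
  obtain ⟨hn, hf⟩ := hpre
  unfold Spec_strict_filter
  rw [Bool.eq_iff_iff]
  exact (A_true_iff node _filter hn hf).trans (B_true_iff node _filter hn hf).symm
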